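-- pv_equiv track=rewrite | github.com/1wen-yang/Galerkin-Methods-for-PDEs-From-Deterministic-to-Probabilistic | Neumann_case1.py | generate_multi_indices
-- ===== SOURCE A (Python) =====
-- def generate_multi_indices(dim, max_degree):
--     multi_idx = []
--     def recurse(current):
--         if sum(current) <= max_degree:
--             if len(current) == dim:
--                 multi_idx.append(tuple(current))
--             else:
--                 for d in range(max_degree - sum(current) + 1):
--                     recurse(current + [d])
--     recurse([])
--     return sorted(multi_idx, key=lambda idx: sum(idx))
-- ===== SOURCE B (Python) =====
-- def generate_multi_indices(dim, max_degree):
--     # Bottom-up DP over dimensions: C[s] holds all tuples of the current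
--     # length with component sum exactly s, in lexicographic order. The final
--     # table, flattened by ascending s, is already sorted by sum, so no sort
--     # is needed.
--     if dim == 0:
--         return [()] if max_degree >= 0 else []
--     C = [[(s,)] for s in range(max_degree + 1)]
--     for _ in range(dim - 1):
--         C = [[(d,) + rest for d in range(s + 1) for rest in C[s - d]]
--              for s in range(max_degree + 1)]
--     return [t for block in C for t in block]
-- ===== Notes on version B (the rewrite author's own statement) =====
-- stated objective: alternative
-- what changed: Replaces A's recursive pruned depth-first enumeration followed by a stable sort with a bottom-up dynamic-programming table whose entry C[s] holds the lexicographically ordered tuples of the current length with sum exactly s, so the flattened table is already in A's output order and composition blocks are shared instead of re-enumerated.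
-- outside the precondition, e.g. on generate_multi_indices(-1, 0): A raises RecursionError, B returns [(0,)]
import Mathlib
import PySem

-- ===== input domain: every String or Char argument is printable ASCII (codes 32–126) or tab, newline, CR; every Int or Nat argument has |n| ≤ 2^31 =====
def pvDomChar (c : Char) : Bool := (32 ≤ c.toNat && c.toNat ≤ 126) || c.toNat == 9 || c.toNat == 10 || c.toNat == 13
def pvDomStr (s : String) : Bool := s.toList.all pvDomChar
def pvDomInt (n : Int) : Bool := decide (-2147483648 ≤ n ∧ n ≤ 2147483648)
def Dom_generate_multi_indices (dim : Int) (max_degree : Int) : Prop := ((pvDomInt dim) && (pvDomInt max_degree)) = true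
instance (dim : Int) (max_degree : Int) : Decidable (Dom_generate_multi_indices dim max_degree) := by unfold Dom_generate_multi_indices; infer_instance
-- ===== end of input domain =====

-- B replaces A's recursive depth-first enumeration plus a final stable sort by a
-- bottom-up table of exact-degree composition blocks, flattened in degree order,
-- so no sort is needed.

-- ===== PORT A =====
-- recurse(current): fuel = dim - len(current) bounds the recursion depth
-- (inside Pre_ the Python recursion is finite and the fuel is never exhausted).
def pvARec (dim max_degree : Int) (fuel : Nat) (current : List Int) (acc : List (List Int)) : List (List Int) :=
  if current.sum ≤ max_degree then
    if (current.length : Int) = dim then acc ++ [current]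
    else
      match fuel with
      | 0 => acc
      | Nat.succ f =>
        (PySem.List.pyRange 0 (max_degree - current.sum + 1)).foldl
          (fun a d => pvARec dim max_degree f (current ++ [d]) a) acc
  else acc

def generate_multi_indices (dim : Int) (max_degree : Int) : List (List Int) :=
  PySem.List.sorted (pvARec dim max_degree dim.toNat [] []) (fun idx => idx.sum) false

-- ===== PORT B =====
-- one pass of the inner list comprehension: new C[s] from the previous table C
def pvBStep (max_degree : Int) (C : List (List (List Int))) : List (List (List Int)) :=
  (PySem.List.pyRange 0 (max_degree + 1)).map
    (fun s => (PySem.List.pyRange 0 (s + 1)).flatMap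
      (fun d => (PySem.List.pyGetD C (s - d) []).map (fun rest => d :: rest)))

def generate_multi_indices_alt (dim : Int) (max_degree : Int) : List (List Int) :=
  if dim = 0 then
    if 0 ≤ max_degree then [([] : List Int)] else []
  else
    ((PySem.List.pyRange 0 (dim - 1)).foldl
      (fun C _ => pvBStep max_degree C)
      ((PySem.List.pyRange 0 (max_degree + 1)).map (fun s => [[s]]))).flatten

-- ===== PRECONDITION & SPEC =====
-- Pre_ excludes dim < 0 with max_degree ≥ 0, where the Python A recurses without
-- bound (RecursionError); it admits every input on which A returns.
def Pre_generate_multi_indices (dim : Int) (max_degree : Int) : Prop :=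
  0 ≤ dim ∨ max_degree < 0
instance (dim : Int) (max_degree : Int) : Decidable (Pre_generate_multi_indices dim max_degree) := by
  unfold Pre_generate_multi_indices; infer_instance

def pvWitness_generate_multi_indices : Int × Int := (2, 3)

def Spec_generate_multi_indices (dim : Int) (max_degree : Int) (out : List (List Int)) : Prop := out = generate_multi_indices_alt dim max_degree
instance (dim : Int) (max_degree : Int) (out : List (List Int)) : Decidable (Spec_generate_multi_indices dim max_degree out) := by unfold Spec_generate_multi_indices; infer_instance

-- ===== CLAIM (what is proved, stated in full; the proofs are below) =====
def Claim_equal_generate_multi_indices : Prop := ∀ (dim : Int) (max_degree : Int), Dom_generate_multi_indices dim max_degree → Pre_generate_multi_indices dim max_degree → Spec_generate_multi_indices dim max_degree (generate_multi_indices dim max_degree)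

-- ===== LEMMAS AND PROOFS =====

-- all length-k tuples of nonnegative ints with sum ≤ b, in lexicographic order
def pvAllLe (b : Int) : Nat → List (List Int)
  | 0 => if 0 ≤ b then [[]] else []
  | Nat.succ k => (PySem.List.pyRange 0 (b + 1)).flatMap (fun d => (pvAllLe (b - d) k).map (d :: ·))

-- all length-k tuples of nonnegative ints with sum exactly s, in lexicographic order
def pvComps (s : Int) : Nat → List (List Int)
  | 0 => if s = 0 then [[]] else []
  | Nat.succ k => (PySem.List.pyRange 0 (s + 1)).flatMap (fun d => (pvComps (s - d) k).map (d :: ·))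

theorem pvARec_eq (dim max_degree : Int) (fuel : Nat) :
    ∀ (current : List Int) (acc : List (List Int)),
      (current.length : Int) + fuel = dim →
      pvARec dim max_degree fuel current acc
        = acc ++ (pvAllLe (max_degree - current.sum) fuel).map (current ++ ·) := by
  induction fuel with
  | zero =>
    intro current acc hlen
    have hd : (current.length : Int) = dim := by omega
    by_cases hs : current.sum ≤ max_degree
    · simp [pvARec, hs, hd, pvAllLe]
    · simp [pvARec, hs, pvAllLe]
  | succ f ih =>
    intro current acc hlen
    have hd : (current.length : Int) ≠ dim := by omega
    by_cases hs : current.sum ≤ max_degree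
    · rw [pvARec]
      simp only [if_pos hs, if_neg hd]
      have hbody : ∀ (a : List (List Int)), ∀ d ∈ PySem.List.pyRange 0 (max_degree - current.sum + 1),
          pvARec dim max_degree f (current ++ [d]) a
            = a ++ (pvAllLe (max_degree - current.sum - d) f).map (fun r => current ++ d :: r) := by
        intro a d _
        rw [ih (current ++ [d]) a (by simp; omega)]
        simp [List.sum_append, sub_sub, List.append_assoc]
      rw [PySem.List.foldl_congr_mem _ _
            (fun a d => a ++ (pvAllLe (max_degree - current.sum - d) f).map (fun r => current ++ d :: r)) acc
            (fun a d hd' => hbody a d hd'),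
          PySem.List.foldl_append_eq_flatMap]
      rw [pvAllLe]
      simp [List.map_flatMap, List.map_map, Function.comp_def]
    · rw [pvARec]
      simp only [if_neg hs]
      rw [pvAllLe, PySem.List.pyRange_one_eq_nil (by omega)]
      simp

theorem pvMem_pvAllLe (k : Nat) : ∀ (b : Int) (t : List Int),
    t ∈ pvAllLe b k → 0 ≤ t.sum ∧ t.sum ≤ b := by
  induction k with
  | zero =>
    intro b t ht
    by_cases hb : (0:Int) ≤ b <;> simp [pvAllLe, hb] at ht
    simp [ht]; omega
  | succ k ih =>
    intro b t ht
    simp only [pvAllLe, List.mem_flatMap, List.mem_map] at ht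
    obtain ⟨d, hd, r, hr, rfl⟩ := ht
    rw [PySem.List.mem_pyRange_one] at hd
    have := ih (b - d) r hr
    simp [List.sum_cons]; omega

theorem pvFilter_pvAllLe (k : Nat) : ∀ (b s : Int), 0 ≤ s → s ≤ b →
    (pvAllLe b k).filter (fun t => t.sum == s) = pvComps s k := by
  induction k with
  | zero =>
    intro b s hs0 hsb
    by_cases h : s = 0 <;>
      simp [pvAllLe, pvComps, show (0:Int) ≤ b by omega, h] <;> omega
  | succ k ih =>
    intro b s hs0 hsb
    rw [pvAllLe, pvComps, List.filter_flatMap,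
        PySem.List.pyRange_one_append 0 (s + 1) (b + 1) (by omega) (by omega),
        List.flatMap_append]
    have h2 : (PySem.List.pyRange (s + 1) (b + 1)).flatMap
        (fun d => ((pvAllLe (b - d) k).map (d :: ·)).filter (fun t => t.sum == s)) = [] := by
      rw [List.flatMap_eq_nil_iff]
      intro d hd
      rw [PySem.List.mem_pyRange_one] at hd
      rw [List.filter_eq_nil_iff]
      intro t ht
      simp only [List.mem_map] at ht
      obtain ⟨r, hr, rfl⟩ := ht
      have := pvMem_pvAllLe k (b - d) r hr
      simp [List.sum_cons]; omega
    rw [h2, List.append_nil]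
    apply List.flatMap_congr
    intro d hd
    rw [PySem.List.mem_pyRange_one] at hd
    rw [List.filter_map]
    have hfil : ((fun t : List Int => t.sum == s) ∘ (d :: ·)) = (fun r : List Int => r.sum == s - d) := by
      funext r
      simp [List.sum_cons]
      constructor <;> intro h <;> omega
    rw [hfil, ih (b - d) (s - d) (by omega) (by omega)]

-- stability of Python's sort: sorting by sum a list whose sums lie in [0, md]
-- concatenates, in sum order, the (order-preserving) fibres of the list
theorem pvInsertBy_front (x : List Int) (l : List (List Int))
    (h : ∀ y ∈ l, decide (x.sum < y.sum) = true) :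
    PySem.List.insertBy (fun a b => decide (a.sum < b.sum)) x l = x :: l := by
  cases l with
  | nil => rfl
  | cons y t => simp [PySem.List.insertBy, h y (by simp)]

theorem pvInsertBy_append_left (x : List Int) (l1 l2 : List (List Int))
    (h : ∀ y ∈ l1, decide (x.sum < y.sum) = false) :
    PySem.List.insertBy (fun a b => decide (a.sum < b.sum)) x (l1 ++ l2)
      = l1 ++ PySem.List.insertBy (fun a b => decide (a.sum < b.sum)) x l2 := by
  induction l1 with
  | nil => rfl
  | cons y t ih =>
    simp only [List.cons_append, PySem.List.insertBy, h y (by simp)]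
    simp only [Bool.false_eq_true, if_false, List.cons.injEq, true_and]
    exact ih (fun z hz => h z (by simp [hz]))

theorem pvInsertBy_group (x : List Int) : ∀ (ks : List Int) (g : Int → List (List Int)),
    ks.Pairwise (· < ·) → (∀ s ∈ ks, ∀ t ∈ g s, t.sum = s) → x.sum ∈ ks →
    PySem.List.insertBy (fun a b => decide (a.sum < b.sum)) x (ks.flatMap g)
      = ks.flatMap (fun s => g s ++ if x.sum == s then [x] else []) := by
  intro ks
  induction ks with
  | nil => intro g _ _ hx; simp at hx
  | cons s ks' ih =>
    intro g hpw hg hx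
    have hlt : ∀ s' ∈ ks', s < s' := (List.pairwise_cons.mp hpw).1
    rw [List.flatMap_cons, List.flatMap_cons]
    by_cases hxs : x.sum = s
    · rw [pvInsertBy_append_left x _ _
        (fun y hy => by simp [hg s (by simp) y hy, hxs])]
      rw [pvInsertBy_front x _ (by
        intro y hy
        simp only [List.mem_flatMap] at hy
        obtain ⟨s', hs', hy'⟩ := hy
        simp [hg s' (by simp [hs']) y hy', hxs, hlt s' hs'])]
      have hrest : ks'.flatMap (fun s' => g s' ++ if x.sum == s' then [x] else [])
          = ks'.flatMap g := by
        apply List.flatMap_congr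
        intro s' hs'
        simp [show x.sum ≠ s' by have := hlt s' hs'; omega]
      rw [hrest, if_pos (by simp [hxs])]
      simp
    · have hx' : x.sum ∈ ks' := by
        rcases List.mem_cons.mp hx with h | h
        · exact absurd h hxs
        · exact h
      have hslt : s < x.sum := hlt _ hx'
      rw [pvInsertBy_append_left x _ _
        (fun y hy => by simp [hg s (by simp) y hy]; omega)]
      rw [ih g (List.pairwise_cons.mp hpw).2 (fun s' hs' => hg s' (by simp [hs'])) hx']
      rw [if_neg (by simpa using hxs)]
      simp

theorem pvSorted_group (md : Int) : ∀ (L : List (List Int)),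
    (∀ t ∈ L, 0 ≤ t.sum ∧ t.sum ≤ md) →
    PySem.List.sorted L (fun t => t.sum) false
      = (PySem.List.pyRange 0 (md + 1)).flatMap (fun s => L.filter (fun t => t.sum == s)) := by
  have hpw : (PySem.List.pyRange 0 (md + 1)).Pairwise (· < ·) := by
    have : ∀ (n : Nat) (a b : Int), (b - a).toNat ≤ n →
        (PySem.List.pyRange a b).Pairwise (· < ·) := by
      intro n
      induction n with
      | zero =>
        intro a b h
        rw [PySem.List.pyRange_one_eq_nil (by omega)]
        exact List.Pairwise.nil
      | succ n ihn =>
        intro a b h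
        by_cases hab : a < b
        · rw [PySem.List.pyRange_one_cons hab]
          refine List.pairwise_cons.mpr ⟨?_, ihn (a + 1) b (by omega)⟩
          intro y hy
          rw [PySem.List.mem_pyRange_one] at hy
          omega
        · rw [PySem.List.pyRange_one_eq_nil (by omega)]
          exact List.Pairwise.nil
    exact this (md + 1 - 0).toNat 0 (md + 1) le_rfl
  intro L
  induction L using List.reverseRecOn with
  | nil => simp [PySem.List.sorted_eq_foldl_insertBy]
  | append_singleton L x ihL =>
    intro hb
    rw [PySem.List.sorted_eq_foldl_insertBy, List.foldl_append, List.foldl_cons, List.foldl_nil,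
        ← PySem.List.sorted_eq_foldl_insertBy]
    rw [ihL (fun t ht => hb t (by simp [ht]))]
    have hbx := hb x (by simp)
    rw [pvInsertBy_group x _ _ hpw
      (fun s _ t ht => by simpa using (List.mem_filter.mp ht).2)
      (by rw [PySem.List.mem_pyRange_one]; omega)]
    apply List.flatMap_congr
    intro s _
    rw [List.filter_append]
    simp [List.filter_singleton]

theorem pvFoldl_iterate {α : Type} (f : α → α) (l : List Int) :
    ∀ (init : α), l.foldl (fun C _ => f C) init = f^[l.length] init := by
  induction l with
  | nil => intro init; rfl
  | cons x t ih =>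
    intro init
    rw [List.foldl_cons, ih, List.length_cons, Function.iterate_succ_apply]

theorem pvBStep_table (max_degree : Int) (n : Nat) :
    pvBStep max_degree ((PySem.List.pyRange 0 (max_degree + 1)).map (fun s => pvComps s n))
      = (PySem.List.pyRange 0 (max_degree + 1)).map (fun s => pvComps s (n + 1)) := by
  unfold pvBStep
  apply List.map_congr_left
  intro s hs
  rw [PySem.List.mem_pyRange_one] at hs
  rw [pvComps]
  apply List.flatMap_congr
  intro d hd
  rw [PySem.List.mem_pyRange_one] at hd
  have hmd : ((max_degree + 1).toNat : Int) = max_degree + 1 := by omega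
  have hsd : (((s - d).toNat : Nat) : Int) = s - d := by omega
  rw [show PySem.List.pyRange 0 (max_degree + 1)
        = PySem.List.pyRange 0 ((max_degree + 1).toNat : Int) by rw [hmd],
      show (s - d) = (((s - d).toNat : Nat) : Int) by rw [hsd],
      PySem.List.pyGetD_map_pyRange (fun s => pvComps s n) (max_degree + 1).toNat
        (s - d).toNat ([] : List (List Int)) (by omega),
      hsd]

theorem pvComps_one (s : Int) (hs : 0 ≤ s) : pvComps s 1 = [[s]] := by
  rw [pvComps, PySem.List.pyRange_one_succ_right hs, List.flatMap_append]
  have hfront : (PySem.List.pyRange 0 s).flatMap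
      (fun d => (pvComps (s - d) 0).map (d :: ·)) = [] := by
    rw [List.flatMap_eq_nil_iff]
    intro d hd
    rw [PySem.List.mem_pyRange_one] at hd
    simp [pvComps, show s - d ≠ 0 by omega]
  rw [hfront, List.nil_append]
  simp [pvComps]

theorem pvTable (max_degree : Int) (n : Nat) :
    (fun C => pvBStep max_degree C)^[n]
        ((PySem.List.pyRange 0 (max_degree + 1)).map (fun s => [[s]]))
      = (PySem.List.pyRange 0 (max_degree + 1)).map (fun s => pvComps s (n + 1)) := by
  induction n with
  | zero =>
    simp only [Function.iterate_zero, id_eq]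
    apply List.map_congr_left
    intro s hs
    rw [PySem.List.mem_pyRange_one] at hs
    rw [pvComps_one s (by omega)]
  | succ n ih =>
    rw [Function.iterate_succ_apply', ih, pvBStep_table]

theorem pvAlt_eq (dim max_degree : Int) (hdim : 1 ≤ dim) :
    generate_multi_indices_alt dim max_degree
      = (PySem.List.pyRange 0 (max_degree + 1)).flatMap (fun s => pvComps s dim.toNat) := by
  unfold generate_multi_indices_alt
  rw [if_neg (by omega), pvFoldl_iterate, PySem.List.length_pyRange_one,
      pvTable max_degree (dim - 1 - 0).toNat,
      show (dim - 1 - 0).toNat + 1 = dim.toNat by omega]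
  rw [List.flatMap_def]

-- ===== VERDICT (by name: the statement is the Claim_ definition above) =====
theorem generate_multi_indices_spec : Claim_equal_generate_multi_indices := by
  intro dim max_degree _ hpre
  unfold Spec_generate_multi_indices generate_multi_indices
  by_cases hdim0 : dim = 0
  · subst hdim0
    by_cases hmd : 0 ≤ max_degree <;>
      simp [pvARec, generate_multi_indices_alt, hmd,
            PySem.List.sorted_eq_foldl_insertBy, PySem.List.insertBy]
  by_cases hdim : 0 ≤ dim
  · rw [pvAlt_eq dim max_degree (by omega)]
    rw [pvARec_eq dim max_degree dim.toNat [] [] (by simp; omega)]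
    simp only [List.sum_nil, sub_zero, List.nil_append]
    rw [show List.map (fun x : List Int => x) (pvAllLe max_degree dim.toNat)
          = pvAllLe max_degree dim.toNat by simp]
    rw [pvSorted_group max_degree _ (fun t ht => pvMem_pvAllLe dim.toNat max_degree t ht)]
    apply List.flatMap_congr
    intro s hs
    rw [PySem.List.mem_pyRange_one] at hs
    exact pvFilter_pvAllLe dim.toNat max_degree s (by omega) (by omega)
  · have hmd : max_degree < 0 := by
      rcases hpre with h | h
      · exact absurd h hdim
      · exact h
    rw [show dim.toNat = 0 by omega]
    rw [pvARec, if_neg (by simp; omega)]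
    rw [generate_multi_indices_alt, if_neg hdim0,
        PySem.List.pyRange_one_eq_nil (show dim - 1 ≤ 0 by omega),
        PySem.List.pyRange_one_eq_nil (show max_degree + 1 ≤ 0 by omega)]
    simp [PySem.List.sorted_eq_foldl_insertBy]
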